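-- pv_equiv track=rewrite | github.com/maephae/Motin | caley.py | generate_dihedral_table
-- ===== SOURCE A (Python) =====
-- def generate_dihedral_table(n):
--     """Generates D_n (Symmetries of n-gon). Order: 2n."""
--     order = 2 * n
--     table = [[0] * order for _ in range(order)]
--     labels = [f"r^{i}s^{j}" for j in range(2) for i in range(n)]
--     for idx1 in range(order):
--         for idx2 in range(order):
--             i1, j1 = idx1 % n, idx1 // n
--             i2, j2 = idx2 % n, idx2 // n
--             new_i = (i1 + i2) % n if j1 == 0 else (i1 - i2) % n
--             new_j = (j1 + j2) % 2
--             table[idx1][idx2] = new_i + (new_j * n)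
--     return table, labels
-- ===== SOURCE B (Python) =====
-- def generate_dihedral_table(n):
--     """Generates D_n (Symmetries of n-gon). Order: 2n."""
--     r = list(range(n))
--     table = []
--     for i1 in r:  # rotation rows: a cyclic left-rotation of r, plus its +n shift
--         rot = r[i1:] + r[:i1]
--         table.append(rot + [x + n for x in rot])
--     for i1 in r:  # reflection rows: a reflected rotation of r
--         rev = r[:i1 + 1][::-1] + r[i1 + 1:][::-1]
--         table.append([x + n for x in rev] + rev)
--     labels = [f"r^{i}s^{j}" for j in (0, 1) for i in r]
--     return table, labels
-- ===== Notes on version B (the rewrite author's own statement) =====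
-- stated objective: faster
-- what changed: B builds each Cayley-table row wholesale as slice-concatenated rotations/reflections of range(n) (plus a +n shift for the flip component) instead of filling all 4n^2 cells one by one with per-cell div/mod arithmetic.
import Mathlib
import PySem

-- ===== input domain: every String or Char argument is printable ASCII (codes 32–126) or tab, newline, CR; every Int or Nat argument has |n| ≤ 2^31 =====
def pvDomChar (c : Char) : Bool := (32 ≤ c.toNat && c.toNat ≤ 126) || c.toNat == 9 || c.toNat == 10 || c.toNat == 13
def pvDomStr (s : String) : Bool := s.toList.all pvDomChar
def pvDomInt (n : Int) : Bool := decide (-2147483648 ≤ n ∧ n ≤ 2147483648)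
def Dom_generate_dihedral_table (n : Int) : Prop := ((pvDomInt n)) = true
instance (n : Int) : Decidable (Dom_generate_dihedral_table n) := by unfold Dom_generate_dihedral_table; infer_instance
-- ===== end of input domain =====

-- B builds each Cayley-table row of D_n wholesale as slice-concatenated rotations/reflections of
-- range(n) (plus a +n shift for the flip component) instead of filling all 4n^2 cells one at a
-- time with per-cell div/mod arithmetic (objective: faster by a constant factor).

-- ===== PORT A =====
def generate_dihedral_table (n : Int) : List (List Int) × List String :=
  let order := 2 * n
  -- [0] * order: for a non-positive count Python gives []; List.replicate order.toNat 0 is exact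
  let table : List (List Int) :=
    (PySem.List.pyRange 0 order 1).map (fun _ => List.replicate order.toNat 0)
  let labels : List String :=
    (PySem.List.pyRange 0 2 1).flatMap (fun j =>
      (PySem.List.pyRange 0 n 1).map (fun i =>
        "r^" ++ PySem.Int.toStr i ++ "s^" ++ PySem.Int.toStr j))
  let table :=
    (PySem.List.pyRange 0 order 1).foldl (fun t idx1 =>
      (PySem.List.pyRange 0 order 1).foldl (fun t idx2 =>
        let i1 := PySem.Int.mod idx1 n
        let j1 := PySem.Int.floordiv idx1 n
        let i2 := PySem.Int.mod idx2 n
        let j2 := PySem.Int.floordiv idx2 n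
        let new_i := if j1 = 0 then PySem.Int.mod (i1 + i2) n else PySem.Int.mod (i1 - i2) n
        let new_j := PySem.Int.mod (j1 + j2) 2
        -- table[idx1][idx2] = …: idx1, idx2 are nonnegative loop indices, so .toNat is exact
        t.modify idx1.toNat (fun row => row.set idx2.toNat (new_i + new_j * n))) t) table
  (table, labels)

-- ===== PORT B =====
def generate_dihedral_table_alt (n : Int) : List (List Int) × List String :=
  let r := PySem.List.pyRange 0 n 1
  -- rotation rows: rot = r[i1:] + r[:i1]
  let rotRows := r.map (fun i1 =>
    let rot := PySem.List.slice r (some i1) none ++ PySem.List.slice r none (some i1)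
    rot ++ rot.map (fun x => x + n))
  -- reflection rows: rev = r[:i1+1][::-1] + r[i1+1:][::-1]; [::-1] is List.reverse
  -- (PySem.List.slice?_none_none_neg_one)
  let refRows := r.map (fun i1 =>
    let rev := (PySem.List.slice r none (some (i1 + 1))).reverse ++
               (PySem.List.slice r (some (i1 + 1)) none).reverse
    rev.map (fun x => x + n) ++ rev)
  let labels := ([0, 1] : List Int).flatMap (fun j =>
    r.map (fun i => "r^" ++ PySem.Int.toStr i ++ "s^" ++ PySem.Int.toStr j))
  (rotRows ++ refRows, labels)

-- ===== PRECONDITION & SPEC =====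
def Spec_generate_dihedral_table (n : Int) (out : List (List Int) × List String) : Prop := out = generate_dihedral_table_alt n
instance (n : Int) (out : List (List Int) × List String) : Decidable (Spec_generate_dihedral_table n out) := by unfold Spec_generate_dihedral_table; infer_instance

-- ===== CLAIM (what is proved, stated in full; the proofs are below) =====
def Claim_equal_generate_dihedral_table : Prop := ∀ (n : Int), Dom_generate_dihedral_table n → Spec_generate_dihedral_table n (generate_dihedral_table n)

-- ===== LEMMAS AND PROOFS =====

-- the value A stores in cell (idx1, idx2)
def pvEntry (n idx1 idx2 : Int) : Int :=
  (if PySem.Int.floordiv idx1 n = 0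
     then PySem.Int.mod (PySem.Int.mod idx1 n + PySem.Int.mod idx2 n) n
     else PySem.Int.mod (PySem.Int.mod idx1 n - PySem.Int.mod idx2 n) n)
  + PySem.Int.mod (PySem.Int.floordiv idx1 n + PySem.Int.floordiv idx2 n) 2 * n

lemma pv_fd_small {n a : Int} (hn : 0 < n) (h0 : 0 ≤ a) (h1 : a < n) :
    PySem.Int.floordiv a n = 0 := by
  rw [PySem.Int.floordiv_eq_iff_of_pos hn]; constructor <;> linarith

lemma pv_mod_small {n a : Int} (hn : 0 < n) (h0 : 0 ≤ a) (h1 : a < n) :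
    PySem.Int.mod a n = a := by
  have h := PySem.Int.floordiv_mul_add_mod a n
  rw [pv_fd_small hn h0 h1] at h; linarith

lemma pv_fd_mid {n a : Int} (hn : 0 < n) (h0 : n ≤ a) (h1 : a < 2 * n) :
    PySem.Int.floordiv a n = 1 := by
  rw [PySem.Int.floordiv_eq_iff_of_pos hn]; constructor <;> linarith

lemma pv_mod_mid {n a : Int} (hn : 0 < n) (h0 : n ≤ a) (h1 : a < 2 * n) :
    PySem.Int.mod a n = a - n := by
  have h := PySem.Int.floordiv_mul_add_mod a n
  rw [pv_fd_mid hn h0 h1] at h; linarith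

lemma pv_mod_neg {n a : Int} (hn : 0 < n) (h0 : -n ≤ a) (h1 : a < 0) :
    PySem.Int.mod a n = a + n := by
  have hfd : PySem.Int.floordiv a n = -1 := by
    rw [PySem.Int.floordiv_eq_iff_of_pos hn]; constructor <;> linarith
  have h := PySem.Int.floordiv_mul_add_mod a n
  rw [hfd] at h; linarith

lemma pv_foldl_set_getElem? (g : Int → Int) (ks : List Int) :
    ∀ (row : List Int) (j : Nat), (∀ k ∈ ks, 0 ≤ k) →
    (ks.foldl (fun r k => r.set k.toNat (g k)) row)[j]? =
      if (j : Int) ∈ ks ∧ j < row.length then some (g j) else row[j]? := by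
  induction ks with
  | nil => intro row j _; simp
  | cons k ks ih =>
    intro row j hpos
    have hk : 0 ≤ k := hpos k (List.mem_cons_self ..)
    rw [List.foldl_cons, ih _ _ (fun x hx => hpos x (List.mem_cons_of_mem _ hx))]
    rw [List.length_set, List.getElem?_set]
    by_cases hlen : j < row.length
    · by_cases hj : (j : Int) ∈ ks
      · simp [hj, hlen]
      · by_cases hjk : (j : Int) = k
        · have hkj : k.toNat = j := by omega
          have hgg : g k = g (j : Int) := by rw [hjk]
          simp [hjk, hkj, hgg, hlen]
        · have hkj : ¬ k.toNat = j := by omega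
          simp [hj, hjk, hkj]
    · have hnone : row[j]? = none := List.getElem?_eq_none (by omega)
      by_cases hj : (j : Int) ∈ ks
      · simp [hj, hlen]; omega
      · by_cases hjk : (j : Int) = k
        · have hkj : k.toNat = j := by omega
          simp [hjk, hkj, hlen]
        · have hkj : ¬ k.toNat = j := by omega
          simp [hj, hjk, hkj, hnone]

lemma pv_foldl_modify_getElem? (F : Int → List Int → List Int) (ks : List Int) :
    ∀ (t : List (List Int)) (j : Nat), (∀ k ∈ ks, 0 ≤ k) → ks.Nodup →
    (ks.foldl (fun t k => t.modify k.toNat (F k)) t)[j]? =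
      if (j : Int) ∈ ks then t[j]?.map (F (j : Int)) else t[j]? := by
  induction ks with
  | nil => intro t j _ _; simp
  | cons k ks ih =>
    intro t j hpos hnd
    have hk : 0 ≤ k := hpos k (List.mem_cons_self ..)
    rw [List.foldl_cons, ih _ _ (fun x hx => hpos x (List.mem_cons_of_mem _ hx)) hnd.of_cons]
    rw [List.getElem?_modify]
    by_cases hjk : (j : Int) = k
    · have hkj : k.toNat = j := by omega
      have hknotin : k ∉ ks := (List.nodup_cons.mp hnd).1
      have hj : ¬ (j : Int) ∈ ks := by rw [hjk]; exact hknotin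
      have hFF : F k = F (j : Int) := by rw [hjk]
      simp [hjk, hkj, hFF, hknotin, Option.map]
    · have hkj : ¬ k.toNat = j := by omega
      by_cases hj : (j : Int) ∈ ks <;> simp [hj, hjk, hkj]

lemma pv_foldl_modify_set (i : Nat) (g : Int → Int) (ks : List Int) :
    ∀ (t : List (List Int)),
    ks.foldl (fun t k => t.modify i (fun row => row.set k.toNat (g k))) t =
      t.modify i (fun row => ks.foldl (fun r k => r.set k.toNat (g k)) row) := by
  induction ks with
  | nil =>
    intro t
    rw [List.foldl_nil]
    exact (List.modify_id (i := i) (l := t)).symm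
  | cons k ks ih =>
    intro t
    rw [List.foldl_cons, ih, List.modify_modify_eq]
    congr 1

lemma pv_map_add_pyRange (a b c : Int) :
    (PySem.List.pyRange a b 1).map (fun x => x + c) = PySem.List.pyRange (a + c) (b + c) 1 := by
  rw [PySem.List.pyRange_one, PySem.List.pyRange_one, List.map_map]
  have h : (b + c - (a + c)).toNat = (b - a).toNat := by omega
  rw [h]
  apply List.map_congr_left
  intro k _
  show a + (k : Int) + c = a + c + (k : Int)
  ring

lemma pv_map_sub_pyRange (c a b : Int) :
    (PySem.List.pyRange a b 1).map (fun x => c - x) = PySem.List.pyRange (c - a) (c - b) (-1) := by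
  rw [PySem.List.pyRange_one, PySem.List.pyRange_neg_one, List.map_map]
  have h : (c - a - (c - b)).toNat = (b - a).toNat := by omega
  rw [h]
  apply List.map_congr_left
  intro k _
  show c - (a + (k : Int)) = c - a - (k : Int)
  ring

lemma pv_reverse_pyRange (a b : Int) :
    (PySem.List.pyRange a b 1).reverse = PySem.List.pyRange (b - 1) (a - 1) (-1) := by
  rw [PySem.List.pyRange_neg_one_eq_reverse]
  norm_num

lemma pv_pyRange_shift (n : Int) :
    PySem.List.pyRange n (2 * n) 1 = (PySem.List.pyRange 0 n 1).map (fun x => x + n) := by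
  rw [pv_map_add_pyRange]
  congr 1 <;> ring

lemma pv_split_outer {α : Type} {n : Int} (hn : 0 < n) (f : Int → α) :
    (PySem.List.pyRange 0 (2 * n) 1).map f =
      (PySem.List.pyRange 0 n 1).map f ++
      (PySem.List.pyRange 0 n 1).map (fun i1 => f (i1 + n)) := by
  rw [PySem.List.pyRange_one_append 0 n (2 * n) (by omega) (by omega), List.map_append,
    pv_pyRange_shift, List.map_map]
  rfl

lemma pv_get_pyRange (b : Int) (j : Nat) (hj : j < b.toNat) :
    (PySem.List.pyRange 0 b 1)[j]? = some ((j : Nat) : Int) := by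
  rw [PySem.List.pyRange_one]
  have h : (b - 0).toNat = b.toNat := by omega
  rw [h, List.getElem?_map, List.getElem?_range hj]
  simp

lemma pv_rot_eq {n i1 : Int} (hn : 0 < n) (h0 : 0 ≤ i1) (h1 : i1 < n) :
    PySem.List.slice (PySem.List.pyRange 0 n 1) (some i1) none ++
      PySem.List.slice (PySem.List.pyRange 0 n 1) none (some i1) =
    (PySem.List.pyRange 0 n 1).map (fun i2 => PySem.Int.mod (i1 + i2) n) := by
  have hsplit : PySem.List.pyRange 0 n 1 =
      PySem.List.pyRange 0 i1 1 ++ PySem.List.pyRange i1 n 1 :=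
    PySem.List.pyRange_one_append 0 i1 n h0 (le_of_lt h1)
  have hlen : (PySem.List.pyRange 0 i1 1).length = i1.toNat := by
    rw [PySem.List.length_pyRange_one]; omega
  have hfrom : PySem.List.slice (PySem.List.pyRange 0 n 1) (some i1) none =
      PySem.List.pyRange i1 n 1 := by
    rw [PySem.List.slice_from _ h0, hsplit, List.drop_left' hlen]
  have hto : PySem.List.slice (PySem.List.pyRange 0 n 1) none (some i1) =
      PySem.List.pyRange 0 i1 1 := by
    rw [PySem.List.slice_to _ h0, hsplit, List.take_left' hlen]
  rw [hfrom, hto]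
  have hsplit2 : PySem.List.pyRange 0 n 1 =
      PySem.List.pyRange 0 (n - i1) 1 ++ PySem.List.pyRange (n - i1) n 1 :=
    PySem.List.pyRange_one_append 0 (n - i1) n (by omega) (by omega)
  rw [hsplit2, List.map_append]
  congr 1
  · have h : (PySem.List.pyRange 0 (n - i1) 1).map (fun i2 => PySem.Int.mod (i1 + i2) n) =
        (PySem.List.pyRange 0 (n - i1) 1).map (fun i2 => i2 + i1) := by
      apply List.map_congr_left
      intro i2 hi2
      rw [PySem.List.mem_pyRange_one] at hi2
      rw [pv_mod_small hn (by omega) (by omega)]; ring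
    rw [h, pv_map_add_pyRange]
    congr 1 <;> ring
  · have h : (PySem.List.pyRange (n - i1) n 1).map (fun i2 => PySem.Int.mod (i1 + i2) n) =
        (PySem.List.pyRange (n - i1) n 1).map (fun i2 => i2 + (i1 - n)) := by
      apply List.map_congr_left
      intro i2 hi2
      rw [PySem.List.mem_pyRange_one] at hi2
      rw [pv_mod_mid hn (by omega) (by omega)]; ring
    rw [h, pv_map_add_pyRange]
    congr 1 <;> ring

lemma pv_rev_eq {n i1 : Int} (hn : 0 < n) (h0 : 0 ≤ i1) (h1 : i1 < n) :
    (PySem.List.slice (PySem.List.pyRange 0 n 1) none (some (i1 + 1))).reverse ++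
      (PySem.List.slice (PySem.List.pyRange 0 n 1) (some (i1 + 1)) none).reverse =
    (PySem.List.pyRange 0 n 1).map (fun i2 => PySem.Int.mod (i1 - i2) n) := by
  have hsplit : PySem.List.pyRange 0 n 1 =
      PySem.List.pyRange 0 (i1 + 1) 1 ++ PySem.List.pyRange (i1 + 1) n 1 :=
    PySem.List.pyRange_one_append 0 (i1 + 1) n (by omega) (by omega)
  have hlen : (PySem.List.pyRange 0 (i1 + 1) 1).length = (i1 + 1).toNat := by
    rw [PySem.List.length_pyRange_one]; omega
  have hto : PySem.List.slice (PySem.List.pyRange 0 n 1) none (some (i1 + 1)) =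
      PySem.List.pyRange 0 (i1 + 1) 1 := by
    rw [PySem.List.slice_to _ (by omega : (0:Int) ≤ i1 + 1), hsplit, List.take_left' hlen]
  have hfrom : PySem.List.slice (PySem.List.pyRange 0 n 1) (some (i1 + 1)) none =
      PySem.List.pyRange (i1 + 1) n 1 := by
    rw [PySem.List.slice_from _ (by omega : (0:Int) ≤ i1 + 1), hsplit, List.drop_left' hlen]
  rw [hto, hfrom, hsplit, List.map_append]
  congr 1
  · have h : (PySem.List.pyRange 0 (i1 + 1) 1).map (fun i2 => PySem.Int.mod (i1 - i2) n) =
        (PySem.List.pyRange 0 (i1 + 1) 1).map (fun i2 => i1 - i2) := by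
      apply List.map_congr_left
      intro i2 hi2
      rw [PySem.List.mem_pyRange_one] at hi2
      rw [pv_mod_small hn (by omega) (by omega)]
    rw [h, pv_map_sub_pyRange, pv_reverse_pyRange]
    congr 1 <;> ring
  · have h : (PySem.List.pyRange (i1 + 1) n 1).map (fun i2 => PySem.Int.mod (i1 - i2) n) =
        (PySem.List.pyRange (i1 + 1) n 1).map (fun i2 => (i1 + n) - i2) := by
      apply List.map_congr_left
      intro i2 hi2
      rw [PySem.List.mem_pyRange_one] at hi2
      rw [pv_mod_neg hn (by omega) (by omega)]; ring
    rw [h, pv_map_sub_pyRange, pv_reverse_pyRange]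
    congr 1 <;> ring

-- A's table, characterized as a map of maps
lemma pv_tableA (n : Int) :
    (generate_dihedral_table n).1 =
      (PySem.List.pyRange 0 (2 * n) 1).map (fun idx1 =>
        (PySem.List.pyRange 0 (2 * n) 1).map (fun idx2 => pvEntry n idx1 idx2)) := by
  have hpos : ∀ k ∈ PySem.List.pyRange 0 (2 * n) 1, (0 : Int) ≤ k :=
    fun k hk => (PySem.List.mem_pyRange_one.mp hk).1
  have hfun : (fun (t : List (List Int)) (idx1 : Int) =>
        (PySem.List.pyRange 0 (2 * n) 1).foldl (fun t idx2 =>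
          t.modify idx1.toNat (fun row => row.set idx2.toNat (pvEntry n idx1 idx2))) t)
      = (fun (t : List (List Int)) (idx1 : Int) =>
        t.modify idx1.toNat (fun row =>
          (PySem.List.pyRange 0 (2 * n) 1).foldl
            (fun r idx2 => r.set idx2.toNat (pvEntry n idx1 idx2)) row)) := by
    funext t idx1
    exact pv_foldl_modify_set idx1.toNat (fun idx2 => pvEntry n idx1 idx2)
      (PySem.List.pyRange 0 (2 * n) 1) t
  show (PySem.List.pyRange 0 (2 * n) 1).foldl (fun t idx1 =>
        (PySem.List.pyRange 0 (2 * n) 1).foldl (fun t idx2 =>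
          t.modify idx1.toNat (fun row => row.set idx2.toNat (pvEntry n idx1 idx2))) t)
      ((PySem.List.pyRange 0 (2 * n) 1).map (fun _ => List.replicate (2 * n).toNat 0))
    = (PySem.List.pyRange 0 (2 * n) 1).map (fun idx1 =>
        (PySem.List.pyRange 0 (2 * n) 1).map (fun idx2 => pvEntry n idx1 idx2))
  rw [hfun]
  apply List.ext_getElem?
  intro j
  rw [pv_foldl_modify_getElem? _ _ _ j hpos (PySem.List.nodup_pyRange_one 0 (2 * n))]
  by_cases hj : j < (2 * n).toNat
  · have hmem : ((j : Nat) : Int) ∈ PySem.List.pyRange 0 (2 * n) 1 := by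
      rw [PySem.List.mem_pyRange_one]; omega
    have hR : (PySem.List.pyRange 0 (2 * n) 1)[j]? = some ((j : Nat) : Int) :=
      pv_get_pyRange (2 * n) j hj
    rw [if_pos hmem, List.getElem?_map, List.getElem?_map, hR]
    simp only [Option.map_some]
    congr 1
    apply List.ext_getElem?
    intro j2
    rw [pv_foldl_set_getElem? _ _ _ j2 hpos, List.getElem?_map]
    by_cases hj2 : j2 < (2 * n).toNat
    · have hmem2 : ((j2 : Nat) : Int) ∈ PySem.List.pyRange 0 (2 * n) 1 := by
        rw [PySem.List.mem_pyRange_one]; omega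
      have hR2 : (PySem.List.pyRange 0 (2 * n) 1)[j2]? = some ((j2 : Nat) : Int) :=
        pv_get_pyRange (2 * n) j2 hj2
      rw [if_pos ⟨hmem2, by rw [List.length_replicate]; exact hj2⟩, hR2]
      rfl
    · have hc : ¬ (((j2 : Nat) : Int) ∈ PySem.List.pyRange 0 (2 * n) 1 ∧
          j2 < (List.replicate (2 * n).toNat (0 : Int)).length) := by
        rw [List.length_replicate]; intro h; exact hj2 h.2
      have hR2 : (PySem.List.pyRange 0 (2 * n) 1)[j2]? = none :=
        List.getElem?_eq_none (by rw [PySem.List.length_pyRange_one]; omega)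
      rw [if_neg hc, hR2,
        List.getElem?_eq_none (by rw [List.length_replicate]; omega)]
      rfl
  · have hmem : ¬ ((j : Nat) : Int) ∈ PySem.List.pyRange 0 (2 * n) 1 := by
      rw [PySem.List.mem_pyRange_one]; omega
    have hR : (PySem.List.pyRange 0 (2 * n) 1)[j]? = none :=
      List.getElem?_eq_none (by rw [PySem.List.length_pyRange_one]; omega)
    rw [if_neg hmem, List.getElem?_map, List.getElem?_map, hR]
    rfl

-- the row of the spec table for a rotation index i1 ∈ [0, n)
lemma pv_rowA_rot {n i1 : Int} (hn : 0 < n) (h0 : 0 ≤ i1) (h1 : i1 < n) :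
    (PySem.List.pyRange 0 (2 * n) 1).map (fun idx2 => pvEntry n i1 idx2) =
      (PySem.List.pyRange 0 n 1).map (fun i2 => PySem.Int.mod (i1 + i2) n) ++
      ((PySem.List.pyRange 0 n 1).map (fun i2 => PySem.Int.mod (i1 + i2) n)).map
        (fun x => x + n) := by
  have hfd1 : PySem.Int.floordiv i1 n = 0 := pv_fd_small hn h0 h1
  have hmd1 : PySem.Int.mod i1 n = i1 := pv_mod_small hn h0 h1
  refine Eq.trans (pv_split_outer hn _) ?_
  congr 1
  · apply List.map_congr_left
    intro i2 hi2
    rw [PySem.List.mem_pyRange_one] at hi2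
    unfold pvEntry
    rw [hfd1, hmd1, pv_fd_small hn hi2.1 hi2.2, pv_mod_small hn hi2.1 hi2.2]
    simp
  · rw [List.map_map]
    apply List.map_congr_left
    intro i2 hi2
    rw [PySem.List.mem_pyRange_one] at hi2
    show pvEntry n i1 (i2 + n) = PySem.Int.mod (i1 + i2) n + n
    unfold pvEntry
    rw [hfd1, hmd1, pv_fd_mid (a := i2 + n) hn (by omega) (by omega),
      pv_mod_mid (a := i2 + n) hn (by omega) (by omega), if_pos rfl,
      show PySem.Int.mod ((0 : Int) + 1) 2 = 1 from by decide,
      show i1 + (i2 + n - n) = i1 + i2 from by ring]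
    ring

-- the row of the spec table for a reflection index i1 + n, i1 ∈ [0, n)
lemma pv_rowA_ref {n i1 : Int} (hn : 0 < n) (h0 : 0 ≤ i1) (h1 : i1 < n) :
    (PySem.List.pyRange 0 (2 * n) 1).map (fun idx2 => pvEntry n (i1 + n) idx2) =
      ((PySem.List.pyRange 0 n 1).map (fun i2 => PySem.Int.mod (i1 - i2) n)).map
        (fun x => x + n) ++
      (PySem.List.pyRange 0 n 1).map (fun i2 => PySem.Int.mod (i1 - i2) n) := by
  have hfd1 : PySem.Int.floordiv (i1 + n) n = 1 := pv_fd_mid hn (by omega) (by omega)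
  have hmd1 : PySem.Int.mod (i1 + n) n = i1 := by
    rw [pv_mod_mid hn (by omega) (by omega)]; ring
  refine Eq.trans (pv_split_outer hn _) ?_
  congr 1
  · rw [List.map_map]
    apply List.map_congr_left
    intro i2 hi2
    rw [PySem.List.mem_pyRange_one] at hi2
    show pvEntry n (i1 + n) i2 = PySem.Int.mod (i1 - i2) n + n
    unfold pvEntry
    rw [hfd1, hmd1, pv_fd_small hn hi2.1 hi2.2, pv_mod_small hn hi2.1 hi2.2,
      if_neg one_ne_zero, show PySem.Int.mod ((1 : Int) + 0) 2 = 1 from by decide]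
    ring
  · apply List.map_congr_left
    intro i2 hi2
    rw [PySem.List.mem_pyRange_one] at hi2
    show pvEntry n (i1 + n) (i2 + n) = PySem.Int.mod (i1 - i2) n
    unfold pvEntry
    rw [hfd1, hmd1, pv_fd_mid (a := i2 + n) hn (by omega) (by omega),
      pv_mod_mid (a := i2 + n) hn (by omega) (by omega), if_neg one_ne_zero,
      show PySem.Int.mod ((1 : Int) + 1) 2 = 0 from by decide,
      show i1 - (i2 + n - n) = i1 - i2 from by ring]
    ring

lemma pv_labels_eq (n : Int) :
    (generate_dihedral_table n).2 = (generate_dihedral_table_alt n).2 := by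
  have h2 : PySem.List.pyRange 0 2 1 = [0, 1] := by decide
  simp only [generate_dihedral_table, generate_dihedral_table_alt, h2]

-- ===== VERDICT (by name: the statement is the Claim_ definition above) =====
theorem generate_dihedral_table_spec : Claim_equal_generate_dihedral_table := by
  intro n _
  show generate_dihedral_table n = generate_dihedral_table_alt n
  by_cases hn : 0 < n
  · refine Prod.ext_iff.mpr ⟨?_, pv_labels_eq n⟩
    rw [pv_tableA]
    refine Eq.trans (pv_split_outer hn _) ?_
    show _ = (PySem.List.pyRange 0 n 1).map _ ++ (PySem.List.pyRange 0 n 1).map _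
    congr 1
    · apply List.map_congr_left
      intro i1 hi1
      rw [PySem.List.mem_pyRange_one] at hi1
      rw [pv_rowA_rot hn hi1.1 hi1.2, ← pv_rot_eq hn hi1.1 hi1.2]
    · apply List.map_congr_left
      intro i1 hi1
      rw [PySem.List.mem_pyRange_one] at hi1
      rw [pv_rowA_ref hn hi1.1 hi1.2, ← pv_rev_eq hn hi1.1 hi1.2]
  · have ha : PySem.List.pyRange 0 (2 * n) 1 = [] :=
      PySem.List.pyRange_one_eq_nil (by omega)
    have hb : PySem.List.pyRange 0 n 1 = [] :=
      PySem.List.pyRange_one_eq_nil (by omega)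
    simp [generate_dihedral_table, generate_dihedral_table_alt, ha, hb]
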